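-- pv_equiv track=rewrite | github.com/lehoangtam90066/Applied_Artificial_Intelligence | Lab_5/2.py | bfs_closing_windows
-- ===== SOURCE A (Python) =====
-- from collections import deque
--
-- directions = [(-1, 0), (1, 0), (0, -1), (0, 1)]
--
-- def bfs_closing_windows(grid):
--     rows, cols = len(grid), len(grid[0])
--     result = [[-1] * cols for _ in range(rows)]  # Ma trận kết quả với giá trị -1 (chưa đóng cửa sổ)
--     queue = deque()
--
--     # Tìm vị trí của tất cả bảo vệ "G" và thêm vào queue
--     for r in range(rows):
--         for c in range(cols):
--             if grid[r][c] == 'G':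
--                 queue.append((r, c, 0))  # Thêm tọa độ bảo vệ và số bước (0)
--                 result[r][c] = 0  # Bảo vệ không cần di chuyển để đóng cửa tại vị trí của chính mình
--
--     # BFS
--     while queue:
--         r, c, steps = queue.popleft()
--
--         # Duyệt qua 4 hướng di chuyển
--         for dr, dc in directions:
--             new_r, new_c = r + dr, c + dc
--
--             # Kiểm tra xem vị trí mới có hợp lệ và có phải là ô "O" hoặc chưa được ghé thăm (-1)
--             if 0 <= new_r < rows and 0 <= new_c < cols and grid[new_r][new_c] == 'O' and result[new_r][new_c] == -1:
--                 result[new_r][new_c] = steps + 1  # Cập nhật số bước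
--                 queue.append((new_r, new_c, steps + 1))
--
--     return result
-- ===== SOURCE B (Python) =====
-- def bfs_closing_windows(grid):
--     rows, cols = len(grid), len(grid[0])
--     result = [[0 if grid[r][c] == 'G' else -1 for c in range(cols)] for r in range(rows)]
--     dist = 0
--     changed = True
--     while changed:
--         changed = False
--         for r in range(rows):
--             for c in range(cols):
--                 if result[r][c] == -1 and grid[r][c] == 'O' and any(
--                         0 <= r + dr < rows and 0 <= c + dc < cols
--                         and result[r + dr][c + dc] == dist
--                         for dr, dc in ((-1, 0), (1, 0), (0, -1), (0, 1))):
--                     result[r][c] = dist + 1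
--                     changed = True
--         dist += 1
--     return result
-- ===== Notes on version B (the rewrite author's own statement) =====
-- stated objective: alternative
-- what changed: Replaces the multi-source BFS queue entirely by iterative grid relaxation: the result matrix is initialised directly from the grid (0 at guards, -1 elsewhere) and then repeatedly swept cell by cell, a pull-based update setting an unvisited 'O' cell to dist+1 when some 4-neighbour already holds dist, until a sweep changes nothing; there is no queue or frontier data structure at all.
import Mathlib
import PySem

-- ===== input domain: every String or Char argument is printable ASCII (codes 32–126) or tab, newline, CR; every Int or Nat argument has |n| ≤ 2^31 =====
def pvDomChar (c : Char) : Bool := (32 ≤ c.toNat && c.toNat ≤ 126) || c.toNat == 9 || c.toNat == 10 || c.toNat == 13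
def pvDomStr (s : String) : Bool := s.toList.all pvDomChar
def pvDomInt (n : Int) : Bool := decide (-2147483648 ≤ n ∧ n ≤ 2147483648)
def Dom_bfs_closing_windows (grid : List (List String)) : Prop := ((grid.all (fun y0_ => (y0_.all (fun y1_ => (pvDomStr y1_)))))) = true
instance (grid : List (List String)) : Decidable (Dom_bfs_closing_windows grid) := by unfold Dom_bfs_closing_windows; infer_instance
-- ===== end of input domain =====

-- B drops A's BFS queue entirely: it initialises the result matrix straight from the grid and then
-- repeatedly SWEEPS the whole matrix, pulling dist+1 into unvisited 'O' cells from a neighbour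
-- holding dist, until a sweep changes nothing (objective: alternative algorithm, same results).

-- ===== PORT A =====
-- small shared helpers: the four directions, result[r][c] = v, result[r][c] read, and the
-- termination measure (queue length + 2 * number of still--1 cells)
def pvDirs : List (Int × Int) := [(-1, 0), (1, 0), (0, -1), (0, 1)]

def pvSet2 (m : List (List Int)) (i j : Nat) (v : Int) : List (List Int) :=
  m.set i ((m.getD i []).set j v)

def pvGet2 (m : List (List Int)) (i j : Nat) : Option Int :=
  m[i]?.bind (fun row => row[j]?)

def pvCountNeg (m : List (List Int)) : Nat :=
  (m.map (fun row => row.count (-1))).sum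

def pvMu {β : Type} (st : List (List Int) × List β) : Nat :=
  st.2.length + 2 * pvCountNeg st.1

theorem pvCount_set_row : ∀ (row : List Int) (j : Nat) (v : Int),
    row[j]? = some (-1) → v ≠ -1 → (row.set j v).count (-1) + 1 = row.count (-1) := by
  intro row
  induction row with
  | nil => intro j v h _; simp at h
  | cons x xs ih =>
    intro j v h hv
    cases j with
    | zero =>
      simp at h
      subst h
      simp [hv]
    | succ j =>
      simp only [List.getElem?_cons_succ] at h
      simp only [List.set_cons_succ, List.count_cons]
      have := ih j v h hv
      omega

theorem pvCountNeg_set : ∀ (m : List (List Int)) (i j : Nat) (v : Int),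
    pvGet2 m i j = some (-1) → v ≠ -1 → pvCountNeg (pvSet2 m i j v) + 1 = pvCountNeg m := by
  intro m
  induction m with
  | nil => intro i j v h _; simp [pvGet2] at h
  | cons row rest ih =>
    intro i j v h hv
    cases i with
    | zero =>
      simp only [pvGet2, List.getElem?_cons_zero, Option.bind_some] at h
      simp only [pvSet2, List.getD_cons_zero, List.set_cons_zero, pvCountNeg, List.map_cons,
        List.sum_cons]
      have := pvCount_set_row row j v h hv
      omega
    | succ i =>
      simp only [pvGet2, List.getElem?_cons_succ] at h
      simp only [pvSet2, List.getD_cons_succ, List.set_cons_succ, pvCountNeg, List.map_cons,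
        List.sum_cons]
      have := ih i j v h hv
      simp only [pvSet2, pvCountNeg] at this
      omega

theorem pvFoldMu {α β : Type} (f : (List (List Int) × List β) → α → (List (List Int) × List β))
    (h : ∀ st a, pvMu (f st a) ≤ pvMu st) :
    ∀ (l : List α) (st : List (List Int) × List β), pvMu (l.foldl f st) ≤ pvMu st := by
  intro l
  induction l with
  | nil => intro st; simp
  | cons a l ih => intro st; exact le_trans (ih (f st a)) (h st a)

-- one direction step of A's inner 'for dr, dc in directions' (state = (result, queue));
-- the unvisited test reads result via get? = some (-1): exact, since the bounds check
-- 0 <= new_r < rows has already passed and result is a rows × cols matrix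
def pvDirStepA (rows cols : Nat) (grid : List (List String)) (r c steps : Nat)
    (st : List (List Int) × List (Nat × Nat × Nat)) (d : Int × Int) :
    List (List Int) × List (Nat × Nat × Nat) :=
  let nr : Int := (r : Int) + d.1
  let nc : Int := (c : Int) + d.2
  if 0 ≤ nr ∧ nr < (rows : Int) ∧ 0 ≤ nc ∧ nc < (cols : Int) ∧
      (grid.getD nr.toNat []).getD nc.toNat "" = "O" ∧ pvGet2 st.1 nr.toNat nc.toNat = some (-1)
  then (pvSet2 st.1 nr.toNat nc.toNat ((steps : Int) + 1), st.2 ++ [(nr.toNat, nc.toNat, steps + 1)])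
  else st

theorem pvDirStepA_mu (rows cols : Nat) (grid : List (List String)) (r c steps : Nat)
    (st : List (List Int) × List (Nat × Nat × Nat)) (d : Int × Int) :
    pvMu (pvDirStepA rows cols grid r c steps st d) ≤ pvMu st := by
  obtain ⟨m, q⟩ := st
  simp only [pvDirStepA]
  split_ifs with h
  · have hv : ((steps : Int) + 1) ≠ -1 := by omega
    have := pvCountNeg_set m _ _ _ h.2.2.2.2.2 hv
    simp only [pvMu, List.length_append, List.length_cons, List.length_nil]
    omega
  · exact le_refl _

-- A's while loop: pop the head, fold the four directions, recurse
def pvALoop (rows cols : Nat) (grid : List (List String)) :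
    List (Nat × Nat × Nat) → List (List Int) → List (List Int)
  | [], m => m
  | (r, c, steps) :: rest, m =>
    let st := pvDirs.foldl (pvDirStepA rows cols grid r c steps) (m, rest)
    pvALoop rows cols grid st.2 st.1
termination_by q m => q.length + 2 * pvCountNeg m
decreasing_by
  have h := pvFoldMu (pvDirStepA rows cols grid r c steps)
    (pvDirStepA_mu rows cols grid r c steps) pvDirs (m, rest)
  simp only [pvMu] at h
  simp only [List.length_cons]
  omega

-- the initial double scan for guards 'G' (state = (result, queue))
def pvInitCellA (grid : List (List String)) (r : Nat)
    (st : List (List Int) × List (Nat × Nat × Nat)) (c : Nat) :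
    List (List Int) × List (Nat × Nat × Nat) :=
  if (grid.getD r []).getD c "" = "G" then (pvSet2 st.1 r c 0, st.2 ++ [(r, c, 0)]) else st

def pvInitA (rows cols : Nat) (grid : List (List String)) :
    List (List Int) × List (Nat × Nat × Nat) :=
  (List.range rows).foldl
    (fun st r => (List.range cols).foldl (pvInitCellA grid r) st)
    (List.replicate rows (List.replicate cols (-1)), [])

def bfs_closing_windows (grid : List (List String)) : List (List Int) :=
  let rows := grid.length
  let cols := (grid.getD 0 []).length  -- len(grid[0]); Pre_ excludes the empty grid, where Python raises
  let init := pvInitA rows cols grid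
  pvALoop rows cols grid init.2 init.1

-- ===== PORT B =====
-- B's per-cell relaxation step of one sweep (state = (result, changed)):
-- if result[r][c] == -1 and grid[r][c] == 'O' and any in-bounds neighbour holds dist,
-- set result[r][c] = dist + 1 and flag the sweep as changed
def pvSweepCell (rows cols : Nat) (grid : List (List String)) (dist : Nat)
    (st : List (List Int) × Bool) (r c : Nat) : List (List Int) × Bool :=
  if pvGet2 st.1 r c = some (-1) ∧ (grid.getD r []).getD c "" = "O" ∧
      (pvDirs.any fun d => decide (0 ≤ (r : Int) + d.1 ∧ (r : Int) + d.1 < (rows : Int) ∧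
        0 ≤ (c : Int) + d.2 ∧ (c : Int) + d.2 < (cols : Int) ∧
        pvGet2 st.1 ((r : Int) + d.1).toNat ((c : Int) + d.2).toNat = some (dist : Int))) = true
  then (pvSet2 st.1 r c ((dist : Int) + 1), true)
  else st

-- one full sweep: the nested 'for r in range(rows): for c in range(cols)'
def pvSweep (rows cols : Nat) (grid : List (List String)) (dist : Nat)
    (m : List (List Int)) : List (List Int) × Bool :=
  (List.range rows).foldl
    (fun st r => (List.range cols).foldl (fun st c => pvSweepCell rows cols grid dist st r c) st)
    (m, false)

-- termination of the sweep loop: a sweep that reports a change filled in at least one -1 cell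
theorem pvSweepCell_decr (rows cols : Nat) (grid : List (List String)) (dist : Nat)
    (st : List (List Int) × Bool) (r c : Nat) :
    pvCountNeg (pvSweepCell rows cols grid dist st r c).1 ≤ pvCountNeg st.1 ∧
      ((pvSweepCell rows cols grid dist st r c).2 = true →
        st.2 = true ∨ pvCountNeg (pvSweepCell rows cols grid dist st r c).1 < pvCountNeg st.1) := by
  obtain ⟨m, ch⟩ := st
  simp only [pvSweepCell]
  split_ifs with h
  · have hv : ((dist : Int) + 1) ≠ -1 := by omega
    have := pvCountNeg_set m r c _ h.1 hv
    constructor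
    · show pvCountNeg (pvSet2 m r c ((dist : Int) + 1)) ≤ pvCountNeg m
      omega
    · intro _; right
      show pvCountNeg (pvSet2 m r c ((dist : Int) + 1)) < pvCountNeg m
      omega
  · exact ⟨le_refl _, fun h2 => Or.inl h2⟩

theorem pvFoldDecr {α : Type} (f : (List (List Int) × Bool) → α → (List (List Int) × Bool))
    (hf : ∀ st a, pvCountNeg (f st a).1 ≤ pvCountNeg st.1 ∧
      ((f st a).2 = true → st.2 = true ∨ pvCountNeg (f st a).1 < pvCountNeg st.1)) :
    ∀ (l : List α) (st : List (List Int) × Bool),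
      pvCountNeg (l.foldl f st).1 ≤ pvCountNeg st.1 ∧
        ((l.foldl f st).2 = true → st.2 = true ∨ pvCountNeg (l.foldl f st).1 < pvCountNeg st.1) := by
  intro l
  induction l with
  | nil => intro st; exact ⟨le_refl _, fun h => Or.inl h⟩
  | cons a l ih =>
    intro st
    simp only [List.foldl_cons]
    have h1 := hf st a
    have h2 := ih (f st a)
    refine ⟨le_trans h2.1 h1.1, fun hc => ?_⟩
    rcases h2.2 hc with h | h
    · rcases h1.2 h with h' | h'
      · exact Or.inl h'
      · right; exact lt_of_le_of_lt h2.1 h'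
    · right; exact lt_of_lt_of_le h (le_refl _) |>.trans_le h1.1

theorem pvSweep_decr (rows cols : Nat) (grid : List (List String)) (dist : Nat)
    (m : List (List Int)) :
    (pvSweep rows cols grid dist m).2 = true →
      pvCountNeg (pvSweep rows cols grid dist m).1 < pvCountNeg m := by
  intro h
  have hrow : ∀ (st : List (List Int) × Bool) (r : Nat),
      pvCountNeg ((List.range cols).foldl (fun st c => pvSweepCell rows cols grid dist st r c) st).1 ≤ pvCountNeg st.1 ∧
        (((List.range cols).foldl (fun st c => pvSweepCell rows cols grid dist st r c) st).2 = true →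
          st.2 = true ∨ pvCountNeg ((List.range cols).foldl (fun st c => pvSweepCell rows cols grid dist st r c) st).1 < pvCountNeg st.1) :=
    fun st r => pvFoldDecr _ (fun st c => pvSweepCell_decr rows cols grid dist st r c) (List.range cols) st
  have := pvFoldDecr
    (fun st r => (List.range cols).foldl (fun st c => pvSweepCell rows cols grid dist st r c) st)
    (fun st r => hrow st r) (List.range rows) (m, false)
  simp only [pvSweep] at h ⊢
  rcases this.2 h with h' | h'
  · simp at h'
  · exact h'

-- B's 'while changed' loop: one sweep, then repeat at dist+1 if anything changed
def pvSweepLoop (rows cols : Nat) (grid : List (List String))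
    (m : List (List Int)) (dist : Nat) : List (List Int) :=
  let sw := pvSweep rows cols grid dist m
  if h : sw.2 = true then pvSweepLoop rows cols grid sw.1 (dist + 1) else sw.1
termination_by pvCountNeg m
decreasing_by exact pvSweep_decr rows cols grid dist m h

-- B's initial comprehension: 0 at guards, -1 elsewhere
def pvInitAlt (rows cols : Nat) (grid : List (List String)) : List (List Int) :=
  (List.range rows).map fun r =>
    (List.range cols).map fun c => if (grid.getD r []).getD c "" = "G" then (0 : Int) else -1

def bfs_closing_windows_alt (grid : List (List String)) : List (List Int) :=
  let rows := grid.length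
  let cols := (grid.getD 0 []).length
  pvSweepLoop rows cols grid (pvInitAlt rows cols grid) 0

-- ===== PRECONDITION & SPEC =====
-- Pre_ excludes exactly the inputs where Python A raises IndexError: the empty grid (grid[0])
-- and grids with a row shorter than the first row (grid[r][c] for c < len(grid[0])).
def Pre_bfs_closing_windows (grid : List (List String)) : Prop :=
  grid ≠ [] ∧ ∀ row ∈ grid, (grid.getD 0 []).length ≤ row.length

instance (grid : List (List String)) : Decidable (Pre_bfs_closing_windows grid) := by
  unfold Pre_bfs_closing_windows; infer_instance

def pvWitness_bfs_closing_windows : List (List String) :=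
  [["G", "O"], ["O", "X"]]

def Spec_bfs_closing_windows (grid : List (List String)) (out : List (List Int)) : Prop := out = bfs_closing_windows_alt grid
instance (grid : List (List String)) (out : List (List Int)) : Decidable (Spec_bfs_closing_windows grid out) := by unfold Spec_bfs_closing_windows; infer_instance

-- ===== CLAIM (what is proved, stated in full; the proofs are below) =====
def Claim_equal_bfs_closing_windows : Prop := ∀ (grid : List (List String)), Dom_bfs_closing_windows grid → Pre_bfs_closing_windows grid → Spec_bfs_closing_windows grid (bfs_closing_windows grid)

-- ===== LEMMAS AND PROOFS =====

-- ---- proof-side intermediate: a level-synchronous reformulation of A's BFS ----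
-- (used only in the proofs: A's queue is first shown equal to this frontier-by-frontier loop,
-- which is then shown equal pointwise to B's sweeping relaxation)
def pvLvlDir (rows cols : Nat) (grid : List (List String)) (dist r c : Nat)
    (st : List (List Int) × List (Nat × Nat)) (d : Int × Int) :
    List (List Int) × List (Nat × Nat) :=
  let nr : Int := (r : Int) + d.1
  let nc : Int := (c : Int) + d.2
  if 0 ≤ nr ∧ nr < (rows : Int) ∧ 0 ≤ nc ∧ nc < (cols : Int) ∧
      (grid.getD nr.toNat []).getD nc.toNat "" = "O" ∧ pvGet2 st.1 nr.toNat nc.toNat = some (-1)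
  then (pvSet2 st.1 nr.toNat nc.toNat ((dist : Int) + 1), st.2 ++ [(nr.toNat, nc.toNat)])
  else st

def pvLvlCell (rows cols : Nat) (grid : List (List String)) (dist : Nat)
    (st : List (List Int) × List (Nat × Nat)) (cell : Nat × Nat) :
    List (List Int) × List (Nat × Nat) :=
  pvDirs.foldl (pvLvlDir rows cols grid dist cell.1 cell.2) st

def pvLvl (rows cols : Nat) (grid : List (List String)) (dist : Nat)
    (f : List (Nat × Nat)) (st : List (List Int) × List (Nat × Nat)) :
    List (List Int) × List (Nat × Nat) :=
  f.foldl (pvLvlCell rows cols grid dist) st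

theorem pvLvlDir_mu (rows cols : Nat) (grid : List (List String)) (dist r c : Nat)
    (st : List (List Int) × List (Nat × Nat)) (d : Int × Int) :
    pvMu (pvLvlDir rows cols grid dist r c st d) ≤ pvMu st := by
  obtain ⟨m, q⟩ := st
  simp only [pvLvlDir]
  split_ifs with h
  · have hv : ((dist : Int) + 1) ≠ -1 := by omega
    have := pvCountNeg_set m _ _ _ h.2.2.2.2.2 hv
    simp only [pvMu, List.length_append, List.length_cons, List.length_nil]
    omega
  · exact le_refl _

theorem pvLvlCell_mu (rows cols : Nat) (grid : List (List String)) (dist : Nat)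
    (st : List (List Int) × List (Nat × Nat)) (cell : Nat × Nat) :
    pvMu (pvLvlCell rows cols grid dist st cell) ≤ pvMu st :=
  pvFoldMu _ (pvLvlDir_mu rows cols grid dist cell.1 cell.2) pvDirs st

theorem pvLvl_mu (rows cols : Nat) (grid : List (List String)) (dist : Nat)
    (f : List (Nat × Nat)) (st : List (List Int) × List (Nat × Nat)) :
    pvMu (pvLvl rows cols grid dist f st) ≤ pvMu st :=
  pvFoldMu _ (pvLvlCell_mu rows cols grid dist) f st

def pvLvlLoop (rows cols : Nat) (grid : List (List String)) :
    List (Nat × Nat) → List (List Int) → Nat → List (List Int)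
  | [], m, _ => m
  | f@(_ :: _), m, dist =>
    let st := pvLvl rows cols grid dist f (m, [])
    pvLvlLoop rows cols grid st.2 st.1 (dist + 1)
termination_by f m _ => f.length + 2 * pvCountNeg m
decreasing_by
  have h := pvLvl_mu rows cols grid dist f (m, [])
  simp only [pvMu, List.length_nil] at h
  simp only [List.length_cons]
  omega

def pvLvlInitCell (grid : List (List String)) (r : Nat)
    (st : List (List Int) × List (Nat × Nat)) (c : Nat) :
    List (List Int) × List (Nat × Nat) :=
  if (grid.getD r []).getD c "" = "G" then (pvSet2 st.1 r c 0, st.2 ++ [(r, c)]) else st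

def pvLvlInit (rows cols : Nat) (grid : List (List String)) :
    List (List Int) × List (Nat × Nat) :=
  (List.range rows).foldl
    (fun st r => (List.range cols).foldl (pvLvlInitCell grid r) st)
    (List.replicate rows (List.replicate cols (-1)), [])

-- generic bridge: a fold threading (result, queue with tagged entries appended at the end)
-- equals the corresponding fold threading (result, untagged list), with the queue prefix kept
theorem pvFoldBridge {α β : Type}
    (fA : (List (List Int) × List β) → α → (List (List Int) × List β))
    (fB : (List (List Int) × List (Nat × Nat)) → α → (List (List Int) × List (Nat × Nat)))
    (tag : Nat × Nat → β)
    (hstep : ∀ (q : List β) (m : List (List Int)) (nx : List (Nat × Nat)) (a : α),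
      fA (m, q ++ nx.map tag) a = ((fB (m, nx) a).1, q ++ ((fB (m, nx) a).2).map tag)) :
    ∀ (l : List α) (q : List β) (m : List (List Int)) (nx : List (Nat × Nat)),
      l.foldl fA (m, q ++ nx.map tag)
        = ((l.foldl fB (m, nx)).1, q ++ ((l.foldl fB (m, nx)).2).map tag) := by
  intro l
  induction l with
  | nil => intro q m nx; simp
  | cons a l ih =>
    intro q m nx
    simp only [List.foldl_cons]
    rw [hstep]
    have := ih q (fB (m, nx) a).1 (fB (m, nx) a).2
    simpa using this

theorem pvDirStep_bridge (rows cols : Nat) (grid : List (List String)) (r c dd : Nat)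
    (q : List (Nat × Nat × Nat)) (m : List (List Int)) (nx : List (Nat × Nat)) (d : Int × Int) :
    pvDirStepA rows cols grid r c dd (m, q ++ nx.map (fun p => (p.1, p.2, dd + 1))) d
      = ((pvLvlDir rows cols grid dd r c (m, nx) d).1,
         q ++ ((pvLvlDir rows cols grid dd r c (m, nx) d).2).map (fun p => (p.1, p.2, dd + 1))) := by
  simp only [pvDirStepA, pvLvlDir]
  split_ifs with h
  · simp
  · rfl

theorem pvCell_bridge (rows cols : Nat) (grid : List (List String)) (dd : Nat)
    (q : List (Nat × Nat × Nat)) (m : List (List Int)) (nx : List (Nat × Nat)) (a : Nat × Nat) :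
    pvDirs.foldl (pvDirStepA rows cols grid a.1 a.2 dd) (m, q ++ nx.map (fun p => (p.1, p.2, dd + 1)))
      = ((pvLvlCell rows cols grid dd (m, nx) a).1,
         q ++ ((pvLvlCell rows cols grid dd (m, nx) a).2).map (fun p => (p.1, p.2, dd + 1))) :=
  pvFoldBridge _ _ _ (fun q m nx d => pvDirStep_bridge rows cols grid a.1 a.2 dd q m nx d) pvDirs q m nx

theorem pvInitCell_bridge (grid : List (List String)) (r : Nat)
    (q : List (Nat × Nat × Nat)) (m : List (List Int)) (nx : List (Nat × Nat)) (c : Nat) :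
    pvInitCellA grid r (m, q ++ nx.map (fun p => (p.1, p.2, 0))) c
      = ((pvLvlInitCell grid r (m, nx) c).1,
         q ++ ((pvLvlInitCell grid r (m, nx) c).2).map (fun p => (p.1, p.2, 0))) := by
  simp only [pvInitCellA, pvLvlInitCell]
  split_ifs with h
  · simp
  · rfl

theorem pvInit_bridge (rows cols : Nat) (grid : List (List String)) :
    pvInitA rows cols grid
      = ((pvLvlInit rows cols grid).1, ((pvLvlInit rows cols grid).2).map (fun p => (p.1, p.2, 0))) := by
  have hrow : ∀ (q : List (Nat × Nat × Nat)) (m : List (List Int)) (nx : List (Nat × Nat)) (r : Nat),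
      (List.range cols).foldl (pvInitCellA grid r) (m, q ++ nx.map (fun p => (p.1, p.2, 0)))
        = (((List.range cols).foldl (pvLvlInitCell grid r) (m, nx)).1,
           q ++ (((List.range cols).foldl (pvLvlInitCell grid r) (m, nx)).2).map (fun p => (p.1, p.2, 0))) := by
    intro q m nx r
    exact pvFoldBridge _ _ _ (pvInitCell_bridge grid r) (List.range cols) q m nx
  have h := pvFoldBridge
      (fun st r => (List.range cols).foldl (pvInitCellA grid r) st)
      (fun st r => (List.range cols).foldl (pvLvlInitCell grid r) st)
      (fun p => (p.1, p.2, 0))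
      (fun q m nx r => hrow q m nx r)
      (List.range rows) []
      (List.replicate rows (List.replicate cols (-1))) []
  simpa [pvInitA, pvLvlInit] using h

-- the queue-to-levels lemma: A's queue loop, run on a queue consisting of the rest of the current
-- generation (tagged d) followed by the already-discovered next generation (tagged d+1),
-- computes exactly the level-synchronous loop
theorem pvMain (rows cols : Nat) (grid : List (List String)) :
    ∀ (n : Nat) (cur nxt : List (Nat × Nat)) (m : List (List Int)) (d : Nat),
      2 * (cur.length + nxt.length + 2 * pvCountNeg m) + (if cur = [] then 1 else 0) ≤ n →
      pvALoop rows cols grid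
          (cur.map (fun p => (p.1, p.2, d)) ++ nxt.map (fun p => (p.1, p.2, d + 1))) m
        = pvLvlLoop rows cols grid (pvLvl rows cols grid d cur (m, nxt)).2
            (pvLvl rows cols grid d cur (m, nxt)).1 (d + 1) := by
  intro n
  induction n using Nat.strong_induction_on with
  | _ n ih =>
    intro cur nxt m d hn
    match cur with
    | [] =>
      simp only [pvLvl, List.foldl_nil, List.map_nil, List.nil_append]
      match nxt with
      | [] => simp [pvALoop, pvLvlLoop]
      | p :: nxt' =>
        have hlt : 2 * ((p :: nxt').length + 0 + 2 * pvCountNeg m) < n := by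
          simp only [List.length_cons, List.length_nil, reduceIte] at hn ⊢
          omega
        have h := ih _ hlt (p :: nxt') [] m (d + 1)
          (by simp only [List.length_nil, if_neg (by simp : (p :: nxt' : List (Nat × Nat)) ≠ [])]; omega)
        simp only [List.map_nil, List.append_nil] at h
        rw [h]
        conv_rhs => rw [pvLvlLoop]
    | a :: cur' =>
      obtain ⟨ar, ac⟩ := a
      rw [show ((ar, ac) :: cur').map (fun p => (p.1, p.2, d)) ++ nxt.map (fun p => (p.1, p.2, d + 1))
            = (ar, ac, d) :: (cur'.map (fun p => (p.1, p.2, d)) ++ nxt.map (fun p => (p.1, p.2, d + 1)))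
          from by simp]
      rw [pvALoop]
      have hb := pvCell_bridge rows cols grid d (cur'.map (fun p => (p.1, p.2, d))) m nxt (ar, ac)
      simp only [hb]
      have hmu : pvMu (pvLvlCell rows cols grid d (m, nxt) (ar, ac)) ≤ pvMu (m, nxt) :=
        pvLvlCell_mu rows cols grid d (m, nxt) (ar, ac)
      have hlt : 2 * (cur'.length + (pvLvlCell rows cols grid d (m, nxt) (ar, ac)).2.length
            + 2 * pvCountNeg (pvLvlCell rows cols grid d (m, nxt) (ar, ac)).1)
            + (if cur' = [] then 1 else 0) < n := by
        simp only [pvMu] at hmu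
        have : (if cur' = [] then 1 else 0) ≤ 1 := by split_ifs <;> omega
        simp only [if_neg (by simp : ((ar, ac) :: cur' : List (Nat × Nat)) ≠ []),
          List.length_cons] at hn
        omega
      have h := ih _ hlt cur' (pvLvlCell rows cols grid d (m, nxt) (ar, ac)).2
        (pvLvlCell rows cols grid d (m, nxt) (ar, ac)).1 d (le_refl _)
      simp only at h
      rw [h]
      simp only [pvLvl, List.foldl_cons]

-- A's port equals the level-synchronous loop started from the guard scan
theorem pvA_eq_lvl (grid : List (List String)) :
    bfs_closing_windows grid
      = pvLvlLoop grid.length (grid.getD 0 []).length grid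
          (pvLvlInit grid.length (grid.getD 0 []).length grid).2
          (pvLvlInit grid.length (grid.getD 0 []).length grid).1 0 := by
  unfold bfs_closing_windows
  simp only []
  rw [pvInit_bridge]
  set rows := grid.length
  set cols := (grid.getD 0 []).length
  obtain ⟨m0, f0⟩ := pvLvlInit rows cols grid
  simp only []
  match f0 with
  | [] => simp [pvALoop, pvLvlLoop]
  | p :: f0' =>
    have h := pvMain rows cols grid
      (2 * ((p :: f0').length + 0 + 2 * pvCountNeg m0) + 1) (p :: f0') [] m0 0
      (by simp)
    simp only [List.map_nil, List.append_nil] at h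
    rw [h]
    conv_rhs => rw [pvLvlLoop]

-- ---- basic matrix lemmas: shape, get/set, extensionality ----
def pvShape (m : List (List Int)) (rows cols : Nat) : Prop :=
  m.length = rows ∧ ∀ row ∈ m, row.length = cols

theorem pvGetElem?_set {α : Type} (l : List α) (i j : Nat) (a : α) :
    (l.set i a)[j]? = if i = j ∧ i < l.length then some a else l[j]? := by
  rcases eq_or_ne i j with rfl | hne
  · by_cases h : i < l.length
    · simp [h]
    · rw [List.set_eq_of_length_le (by omega)]
      simp [h]
  · simp [List.getElem?_set_ne hne, hne]

theorem pvGet2_some {m : List (List Int)} {i j : Nat} {v : Int} (h : pvGet2 m i j = some v) :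
    ∃ row, m[i]? = some row ∧ row[j]? = some v := by
  unfold pvGet2 at h
  cases hm : m[i]? with
  | none => rw [hm] at h; simp at h
  | some row => rw [hm] at h; exact ⟨row, rfl, by simpa using h⟩

theorem pvGet2_bounds {m : List (List Int)} {rows cols i j : Nat} {v : Int}
    (hs : pvShape m rows cols) (h : pvGet2 m i j = some v) : i < rows ∧ j < cols := by
  obtain ⟨row, hrow, hv⟩ := pvGet2_some h
  obtain ⟨hi, hgi⟩ := List.getElem?_eq_some_iff.mp hrow
  obtain ⟨hj, -⟩ := List.getElem?_eq_some_iff.mp hv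
  refine ⟨hs.1 ▸ hi, ?_⟩
  have hmem : row ∈ m := hgi ▸ List.getElem_mem hi
  rw [← hs.2 row hmem]
  exact hj

theorem pvGet2_set2_self {m : List (List Int)} {i j : Nat} {w : Int} (v : Int)
    (h : pvGet2 m i j = some w) : pvGet2 (pvSet2 m i j v) i j = some v := by
  obtain ⟨row, hrow, hv⟩ := pvGet2_some h
  obtain ⟨hi, hgi⟩ := List.getElem?_eq_some_iff.mp hrow
  obtain ⟨hj, -⟩ := List.getElem?_eq_some_iff.mp hv
  have hgetD : m.getD i [] = row := by simp [List.getD_eq_getElem?_getD, hrow]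
  unfold pvGet2 pvSet2
  rw [hgetD, pvGetElem?_set]
  rw [if_pos ⟨rfl, hi⟩, Option.bind_some, pvGetElem?_set]
  have hj' : j < row.length := hj
  simp [hj']

theorem pvGet2_set2_ne {m : List (List Int)} {i j i' j' : Nat} (v : Int)
    (h : ¬(i = i' ∧ j = j')) : pvGet2 (pvSet2 m i j v) i' j' = pvGet2 m i' j' := by
  unfold pvGet2 pvSet2
  rw [pvGetElem?_set]
  split_ifs with hc
  · obtain ⟨rfl, hi⟩ := hc
    have hj : j ≠ j' := fun hj => h ⟨rfl, hj⟩
    rw [List.getElem?_eq_getElem hi]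
    have hgetD : m.getD i [] = m[i] := by simp [List.getD_eq_getElem?_getD, List.getElem?_eq_getElem hi]
    rw [hgetD, Option.bind_some, Option.bind_some, List.getElem?_set_ne hj]
  · rfl

theorem pvShape_set2 {m : List (List Int)} {rows cols : Nat} (i j : Nat) (v : Int)
    (hs : pvShape m rows cols) : pvShape (pvSet2 m i j v) rows cols := by
  by_cases hi : i < m.length
  · obtain ⟨h1, h2⟩ := hs
    refine ⟨by simpa [pvSet2] using h1, ?_⟩
    intro row hrow
    unfold pvSet2 at hrow
    rcases List.mem_or_eq_of_mem_set hrow with h | h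
    · exact h2 row h
    · subst h
      rw [List.length_set]
      exact h2 _ (by rw [List.getD_eq_getElem?_getD, List.getElem?_eq_getElem hi]; exact List.getElem_mem hi)
  · unfold pvSet2
    rw [List.set_eq_of_length_le (by omega)]
    exact hs

theorem pvExt2 {m m' : List (List Int)} {rows cols : Nat}
    (hs : pvShape m rows cols) (hs' : pvShape m' rows cols)
    (h : ∀ i j, pvGet2 m i j = pvGet2 m' i j) : m = m' := by
  have hlen : m.length = m'.length := by rw [hs.1, hs'.1]
  apply List.ext_getElem hlen
  intro i hi hi'
  have hleni : m[i].length = m'[i].length := by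
    rw [hs.2 _ (List.getElem_mem hi), hs'.2 _ (List.getElem_mem hi')]
  apply List.ext_getElem hleni
  intro j hj hj'
  have := h i j
  unfold pvGet2 at this
  rw [List.getElem?_eq_getElem hi, List.getElem?_eq_getElem hi'] at this
  simp only [Option.bind_some] at this
  rw [List.getElem?_eq_getElem hj, List.getElem?_eq_getElem hj'] at this
  simpa using this

-- ---- eligibility predicates: the cells a level/sweep fills in, wrt the matrix at level start ----
def pvBase (grid : List (List String)) (m : List (List Int)) (x : Nat × Nat) : Prop :=
  pvGet2 m x.1 x.2 = some (-1) ∧ (grid.getD x.1 []).getD x.2 "" = "O"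

def pvHits (rows cols : Nat) (p : Nat × Nat) (ds : List (Int × Int)) (x : Nat × Nat) : Prop :=
  ∃ d ∈ ds, 0 ≤ (p.1 : Int) + d.1 ∧ (p.1 : Int) + d.1 < (rows : Int) ∧
    0 ≤ (p.2 : Int) + d.2 ∧ (p.2 : Int) + d.2 < (cols : Int) ∧
    x.1 = ((p.1 : Int) + d.1).toNat ∧ x.2 = ((p.2 : Int) + d.2).toNat

def pvEligL (rows cols : Nat) (grid : List (List String)) (m : List (List Int))
    (f : List (Nat × Nat)) (x : Nat × Nat) : Prop :=
  pvBase grid m x ∧ ∃ p ∈ f, pvHits rows cols p pvDirs x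

def pvEligS (rows cols : Nat) (grid : List (List String)) (m : List (List Int))
    (dist : Nat) (x : Nat × Nat) : Prop :=
  pvBase grid m x ∧ ∃ d ∈ pvDirs, 0 ≤ (x.1 : Int) + d.1 ∧ (x.1 : Int) + d.1 < (rows : Int) ∧
    0 ≤ (x.2 : Int) + d.2 ∧ (x.2 : Int) + d.2 < (cols : Int) ∧
    pvGet2 m ((x.1 : Int) + d.1).toNat ((x.2 : Int) + d.2).toNat = some (dist : Int)

theorem pvDirs_neg : ∀ d ∈ pvDirs, (-d.1, -d.2) ∈ pvDirs := by decide

theorem pvElig_iff {rows cols : Nat} {grid : List (List String)} {m : List (List Int)}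
    {f : List (Nat × Nat)} {d : Nat} (hs : pvShape m rows cols)
    (hf : ∀ p : Nat × Nat, p ∈ f ↔ pvGet2 m p.1 p.2 = some (d : Int)) (x : Nat × Nat) :
    pvEligL rows cols grid m f x ↔ pvEligS rows cols grid m d x := by
  constructor
  · rintro ⟨hb, p, hp, e, he, h1, h2, h3, h4, hx1, hx2⟩
    have hpm := (hf p).mp hp
    have hpb := pvGet2_bounds hs hpm
    have e1 : (x.1 : Int) = (p.1 : Int) + e.1 := by omega
    have e2 : (x.2 : Int) = (p.2 : Int) + e.2 := by omega
    refine ⟨hb, (-e.1, -e.2), pvDirs_neg e he, by omega, by omega, by omega, by omega, ?_⟩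
    have t1 : ((x.1 : Int) + -e.1).toNat = p.1 := by omega
    have t2 : ((x.2 : Int) + -e.2).toNat = p.2 := by omega
    rw [t1, t2]
    exact hpm
  · rintro ⟨hb, e, he, h1, h2, h3, h4, hg⟩
    have hxb := pvGet2_bounds hs hb.1
    have hy := (hf (((x.1 : Int) + e.1).toNat, ((x.2 : Int) + e.2).toNat)).mpr hg
    refine ⟨hb, _, hy, (-e.1, -e.2), pvDirs_neg e he, ?_, ?_, ?_, ?_, ?_, ?_⟩ <;>
      simp only [] <;> omega

-- ---- characterisation of one level of the frontier loop ----
theorem pvLvlDirs_char (rows cols : Nat) (grid : List (List String)) (d : Nat)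
    (m₀ : List (List Int)) (p : Nat × Nat) :
    ∀ (ds : List (Int × Int)) (m : List (List Int)) (nxt : List (Nat × Nat))
      (W : Nat × Nat → Prop),
      (∀ x, W x → pvGet2 m x.1 x.2 = some ((d : Int) + 1)) →
      (∀ x, ¬ W x → pvGet2 m x.1 x.2 = pvGet2 m₀ x.1 x.2) →
      (∀ x, x ∈ nxt ↔ W x) →
      (∀ x, (W x ∨ (pvBase grid m₀ x ∧ pvHits rows cols p ds x)) →
          pvGet2 (ds.foldl (pvLvlDir rows cols grid d p.1 p.2) (m, nxt)).1 x.1 x.2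
            = some ((d : Int) + 1)) ∧
      (∀ x, ¬ (W x ∨ (pvBase grid m₀ x ∧ pvHits rows cols p ds x)) →
          pvGet2 (ds.foldl (pvLvlDir rows cols grid d p.1 p.2) (m, nxt)).1 x.1 x.2
            = pvGet2 m₀ x.1 x.2) ∧
      (∀ x, x ∈ (ds.foldl (pvLvlDir rows cols grid d p.1 p.2) (m, nxt)).2 ↔
          (W x ∨ (pvBase grid m₀ x ∧ pvHits rows cols p ds x))) := by
  intro ds
  induction ds with
  | nil =>
    intro m nxt W hW1 hW2 hn
    have hnil : ∀ x, ¬ pvHits rows cols p [] x := by simp [pvHits]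
    refine ⟨fun x hx => hW1 x ?_, fun x hx => hW2 x ?_, fun x => (hn x).trans ?_⟩
    · rcases hx with h | h
      · exact h
      · exact absurd h.2 (hnil x)
    · intro hw; exact hx (Or.inl hw)
    · constructor
      · exact Or.inl
      · rintro (h | h)
        · exact h
        · exact absurd h.2 (hnil x)
  | cons e ds ih =>
    intro m nxt W hW1 hW2 hn
    simp only [List.foldl_cons]
    have hsplit : ∀ x, pvHits rows cols p (e :: ds) x
        ↔ (pvHits rows cols p [e] x ∨ pvHits rows cols p ds x) := by
      intro x
      simp only [pvHits, List.mem_cons]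
      constructor
      · rintro ⟨dd, (rfl | hdd), h⟩
        · exact Or.inl ⟨dd, Or.inl rfl, h⟩
        · exact Or.inr ⟨dd, hdd, h⟩
      · rintro (⟨dd, rfl | h, hh⟩ | ⟨dd, hdd, hh⟩)
        · exact ⟨dd, Or.inl rfl, hh⟩
        · simp at h
        · exact ⟨dd, Or.inr hdd, hh⟩
    have hone : ∀ x, pvHits rows cols p [e] x →
        (0 ≤ (p.1 : Int) + e.1 ∧ (p.1 : Int) + e.1 < (rows : Int) ∧
         0 ≤ (p.2 : Int) + e.2 ∧ (p.2 : Int) + e.2 < (cols : Int) ∧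
         x = (((p.1 : Int) + e.1).toNat, ((p.2 : Int) + e.2).toNat)) := by
      rintro x ⟨dd, hdd, h1, h2, h3, h4, hx1, hx2⟩
      simp only [List.mem_singleton] at hdd
      subst hdd
      exact ⟨h1, h2, h3, h4, Prod.ext hx1 hx2⟩
    set W₁ : Nat × Nat → Prop :=
      fun x => W x ∨ (pvBase grid m₀ x ∧ pvHits rows cols p [e] x) with hW₁def
    have hstep :
        (∀ x, W₁ x → pvGet2 (pvLvlDir rows cols grid d p.1 p.2 (m, nxt) e).1 x.1 x.2
            = some ((d : Int) + 1)) ∧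
        (∀ x, ¬ W₁ x → pvGet2 (pvLvlDir rows cols grid d p.1 p.2 (m, nxt) e).1 x.1 x.2
            = pvGet2 m₀ x.1 x.2) ∧
        (∀ x, x ∈ (pvLvlDir rows cols grid d p.1 p.2 (m, nxt) e).2 ↔ W₁ x) := by
      simp only [pvLvlDir]
      split_ifs with hg
      · -- the step writes cell t
        obtain ⟨hg1, hg2, hg3, hg4, hgO, hgM⟩ := hg
        set t : Nat × Nat := (((p.1 : Int) + e.1).toNat, ((p.2 : Int) + e.2).toNat) with htdef
        have hWt : ¬ W t := by
          intro hw
          rw [hW1 t hw] at hgM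
          have := Option.some.inj hgM
          omega
        have hm0t : pvGet2 m₀ t.1 t.2 = some (-1) := (hW2 t hWt) ▸ hgM
        have hbase : pvBase grid m₀ t := ⟨hm0t, hgO⟩
        have hhits : pvHits rows cols p [e] t := ⟨e, by simp, hg1, hg2, hg3, hg4, rfl, rfl⟩
        have hW₁t : W₁ t := Or.inr ⟨hbase, hhits⟩
        refine ⟨?_, ?_, ?_⟩
        · intro x hx
          by_cases hxt : x = t
          · subst hxt
            exact pvGet2_set2_self _ hgM
          · rw [pvGet2_set2_ne _ (fun hc => hxt (Prod.ext hc.1.symm hc.2.symm))]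
            rcases hx with h | h
            · exact hW1 x h
            · exact absurd ((hone x h.2).2.2.2.2) hxt
        · intro x hx
          have hxt : x ≠ t := fun hc => hx (hc ▸ hW₁t)
          rw [pvGet2_set2_ne _ (fun hc => hxt (Prod.ext hc.1.symm hc.2.symm))]
          exact hW2 x (fun hw => hx (Or.inl hw))
        · intro x
          simp only [List.mem_append, List.mem_singleton, hn x]
          constructor
          · rintro (h | rfl)
            · exact Or.inl h
            · exact hW₁t
          · rintro (h | h)
            · exact Or.inl h
            · exact Or.inr ((hone x h.2).2.2.2.2)
      · -- the step does nothing: a [e]-hit cell is already handled or not eligible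
        have hW₁W : ∀ x, W₁ x ↔ W x := by
          intro x
          refine ⟨?_, Or.inl⟩
          rintro (h | ⟨hb, hh⟩)
          · exact h
          · obtain ⟨h1, h2, h3, h4, rfl⟩ := hone x hh
            by_contra hw
            exact hg ⟨h1, h2, h3, h4, hb.2, (hW2 _ hw).trans hb.1⟩
        exact ⟨fun x hx => hW1 x ((hW₁W x).mp hx),
               fun x hx => hW2 x (fun hw => hx ((hW₁W x).mpr hw)),
               fun x => (hn x).trans ((hW₁W x).symm)⟩
    obtain ⟨c1, c2, c3⟩ := ih (pvLvlDir rows cols grid d p.1 p.2 (m, nxt) e).1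
      (pvLvlDir rows cols grid d p.1 p.2 (m, nxt) e).2 W₁ hstep.1 hstep.2.1 hstep.2.2
    have hconv : ∀ x, (W₁ x ∨ (pvBase grid m₀ x ∧ pvHits rows cols p ds x))
        ↔ (W x ∨ (pvBase grid m₀ x ∧ pvHits rows cols p (e :: ds) x)) := by
      intro x
      rw [hW₁def]
      simp only [hsplit x]
      tauto
    exact ⟨fun x hx => c1 x ((hconv x).mpr hx),
           fun x hx => c2 x (fun hc => hx ((hconv x).mp hc)),
           fun x => (c3 x).trans (hconv x)⟩

theorem pvLvl_char (rows cols : Nat) (grid : List (List String)) (d : Nat)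
    (m₀ : List (List Int)) :
    ∀ (f : List (Nat × Nat)) (m : List (List Int)) (nxt : List (Nat × Nat))
      (W : Nat × Nat → Prop),
      (∀ x, W x → pvGet2 m x.1 x.2 = some ((d : Int) + 1)) →
      (∀ x, ¬ W x → pvGet2 m x.1 x.2 = pvGet2 m₀ x.1 x.2) →
      (∀ x, x ∈ nxt ↔ W x) →
      (∀ x, (W x ∨ (pvBase grid m₀ x ∧ ∃ p ∈ f, pvHits rows cols p pvDirs x)) →
          pvGet2 (pvLvl rows cols grid d f (m, nxt)).1 x.1 x.2 = some ((d : Int) + 1)) ∧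
      (∀ x, ¬ (W x ∨ (pvBase grid m₀ x ∧ ∃ p ∈ f, pvHits rows cols p pvDirs x)) →
          pvGet2 (pvLvl rows cols grid d f (m, nxt)).1 x.1 x.2 = pvGet2 m₀ x.1 x.2) ∧
      (∀ x, x ∈ (pvLvl rows cols grid d f (m, nxt)).2 ↔
          (W x ∨ (pvBase grid m₀ x ∧ ∃ p ∈ f, pvHits rows cols p pvDirs x))) := by
  intro f
  induction f with
  | nil =>
    intro m nxt W hW1 hW2 hn
    simp only [pvLvl, List.foldl_nil]
    refine ⟨fun x hx => hW1 x ?_, fun x hx => hW2 x ?_, fun x => (hn x).trans ?_⟩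
    · rcases hx with h | h
      · exact h
      · simp at h
    · intro hw; exact hx (Or.inl hw)
    · simp
  | cons p f ih =>
    intro m nxt W hW1 hW2 hn
    simp only [pvLvl, List.foldl_cons]
    obtain ⟨c1, c2, c3⟩ := pvLvlDirs_char rows cols grid d m₀ p pvDirs m nxt W hW1 hW2 hn
    have h := ih (pvLvlCell rows cols grid d (m, nxt) p).1 (pvLvlCell rows cols grid d (m, nxt) p).2
      (fun x => W x ∨ (pvBase grid m₀ x ∧ pvHits rows cols p pvDirs x)) c1 c2 c3
    obtain ⟨d1, d2, d3⟩ := h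
    have hconv : ∀ x, ((W x ∨ (pvBase grid m₀ x ∧ pvHits rows cols p pvDirs x))
          ∨ (pvBase grid m₀ x ∧ ∃ q ∈ f, pvHits rows cols q pvDirs x))
        ↔ (W x ∨ (pvBase grid m₀ x ∧ ∃ q ∈ p :: f, pvHits rows cols q pvDirs x)) := by
      intro x
      simp only [List.mem_cons]
      constructor
      · rintro ((h | ⟨hb, hh⟩) | ⟨hb, q, hq, hh⟩)
        · exact Or.inl h
        · exact Or.inr ⟨hb, p, Or.inl rfl, hh⟩
        · exact Or.inr ⟨hb, q, Or.inr hq, hh⟩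
      · rintro (h | ⟨hb, q, rfl | hq, hh⟩)
        · exact Or.inl (Or.inl h)
        · exact Or.inl (Or.inr ⟨hb, hh⟩)
        · exact Or.inr ⟨hb, q, hq, hh⟩
    have hfold : (pvLvl rows cols grid d f (pvLvlCell rows cols grid d (m, nxt) p)).1
        = (f.foldl (pvLvlCell rows cols grid d) (pvLvlCell rows cols grid d (m, nxt) p)).1 := rfl
    refine ⟨fun x hx => ?_, fun x hx => ?_, fun x => ?_⟩
    · exact d1 x ((hconv x).mpr hx)
    · exact d2 x (fun hc => hx ((hconv x).mp hc))
    · exact (d3 x).trans (hconv x)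

-- ---- characterisation of one sweep ----
def pvLex (rows cols : Nat) : List (Nat × Nat) :=
  (List.range rows).flatMap fun r => (List.range cols).map fun c => (r, c)

theorem pvFoldl_flatMap {α β γ : Type} (l : List α) (g : α → List β) (f : γ → β → γ) (b : γ) :
    (l.flatMap g).foldl f b = l.foldl (fun b a => (g a).foldl f b) b := by
  induction l generalizing b with
  | nil => rfl
  | cons a l ih => simp [List.flatMap_cons, List.foldl_append, ih]

theorem pvSweep_eq_lex (rows cols : Nat) (grid : List (List String)) (dist : Nat)
    (m : List (List Int)) :
    pvSweep rows cols grid dist m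
      = (pvLex rows cols).foldl (fun st x => pvSweepCell rows cols grid dist st x.1 x.2)
          (m, false) := by
  unfold pvSweep pvLex
  rw [pvFoldl_flatMap]
  congr 1
  funext st r
  rw [List.foldl_map]

theorem pvLex_nodup (rows cols : Nat) : (pvLex rows cols).Nodup := by
  have h : pvLex rows cols = (List.range rows) ×ˢ (List.range cols) := rfl
  rw [h]
  exact (List.nodup_range).product (List.nodup_range)

theorem pvLex_mem (rows cols : Nat) (x : Nat × Nat) :
    x ∈ pvLex rows cols ↔ x.1 < rows ∧ x.2 < cols := by
  have h : pvLex rows cols = (List.range rows) ×ˢ (List.range cols) := rfl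
  rw [h]
  obtain ⟨a, b⟩ := x
  show (a, b) ∈ (List.range rows).product (List.range cols) ↔ _
  rw [List.pair_mem_product]
  simp

theorem pvSweepFold_char (rows cols : Nat) (grid : List (List String)) (dist : Nat)
    (m₀ : List (List Int)) :
    ∀ (L : List (Nat × Nat)) (m : List (List Int)) (ch : Bool) (P : Nat × Nat → Prop),
      L.Nodup →
      (∀ x ∈ L, ¬ P x) →
      (∀ x, (P x ∧ pvEligS rows cols grid m₀ dist x) →
          pvGet2 m x.1 x.2 = some ((dist : Int) + 1)) →
      (∀ x, ¬ (P x ∧ pvEligS rows cols grid m₀ dist x) →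
          pvGet2 m x.1 x.2 = pvGet2 m₀ x.1 x.2) →
      (ch = true ↔ ∃ x, P x ∧ pvEligS rows cols grid m₀ dist x) →
      (∀ x, ((P x ∨ x ∈ L) ∧ pvEligS rows cols grid m₀ dist x) →
          pvGet2 ((L.foldl (fun st x => pvSweepCell rows cols grid dist st x.1 x.2) (m, ch))).1 x.1 x.2
            = some ((dist : Int) + 1)) ∧
      (∀ x, ¬ ((P x ∨ x ∈ L) ∧ pvEligS rows cols grid m₀ dist x) →
          pvGet2 ((L.foldl (fun st x => pvSweepCell rows cols grid dist st x.1 x.2) (m, ch))).1 x.1 x.2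
            = pvGet2 m₀ x.1 x.2) ∧
      ((L.foldl (fun st x => pvSweepCell rows cols grid dist st x.1 x.2) (m, ch)).2 = true
          ↔ ∃ x, (P x ∨ x ∈ L) ∧ pvEligS rows cols grid m₀ dist x) := by
  intro L
  induction L with
  | nil =>
    intro m ch P _ _ hm1 hm2 hch
    simp only [List.foldl_nil]
    refine ⟨fun x hx => hm1 x ?_, fun x hx => hm2 x ?_, hch.trans ?_⟩
    · simpa using hx
    · simpa using hx
    · simp
  | cons a L ihL =>
    intro m ch P hnd hdisj hm1 hm2 hch
    have hPa : ¬ P a := hdisj a List.mem_cons_self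
    have hma : pvGet2 m a.1 a.2 = pvGet2 m₀ a.1 a.2 := hm2 a (fun hc => hPa hc.1)
    have hnb : ∀ i j, pvGet2 m i j = some (dist : Int) ↔ pvGet2 m₀ i j = some (dist : Int) := by
      intro i j
      by_cases hPE : P (i, j) ∧ pvEligS rows cols grid m₀ dist (i, j)
      · have h1 := hm1 (i, j) hPE
        have h2 := hPE.2.1.1
        constructor
        · intro h
          rw [h1] at h
          have := Option.some.inj h
          omega
        · intro h
          rw [h2] at h
          have := Option.some.inj h
          omega
      · rw [hm2 (i, j) hPE]
    simp only [List.foldl_cons]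
    by_cases hE : pvEligS rows cols grid m₀ dist a
    · have hcell : pvSweepCell rows cols grid dist (m, ch) a.1 a.2
          = (pvSet2 m a.1 a.2 ((dist : Int) + 1), true) := by
        unfold pvSweepCell
        rw [if_pos]
        refine ⟨hma.trans hE.1.1, hE.1.2, ?_⟩
        obtain ⟨-, e, he, h1, h2, h3, h4, hg⟩ := hE
        exact List.any_eq_true.mpr ⟨e, he, decide_eq_true ⟨h1, h2, h3, h4, (hnb _ _).mpr hg⟩⟩
      rw [hcell]
      have hW := ihL (pvSet2 m a.1 a.2 ((dist : Int) + 1)) true (fun x => P x ∨ x = a)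
        (List.nodup_cons.mp hnd).2
        (fun x hx => by
          rcases List.nodup_cons.mp hnd with ⟨hna, -⟩
          rintro (h | rfl)
          · exact hdisj x (List.mem_cons_of_mem _ hx) h
          · exact hna hx)
        (fun x hx => by
          rcases hx with ⟨h | rfl, hel⟩
          · rw [pvGet2_set2_ne _ (fun hc => ?_)]
            · exact hm1 x ⟨h, hel⟩
            · rcases List.nodup_cons.mp hnd with ⟨-, -⟩
              -- x = a would contradict ¬ P a
              exact hPa (by rwa [show x = a from Prod.ext hc.1.symm hc.2.symm] at h)
          · exact pvGet2_set2_self _ (hma.trans hE.1.1))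
        (fun x hx => by
          have hxa : x ≠ a := fun hc => hx (by rw [hc]; exact ⟨Or.inr rfl, hE⟩)
          rw [pvGet2_set2_ne _ (fun hc => hxa (Prod.ext hc.1.symm hc.2.symm))]
          exact hm2 x (fun hc => hx ⟨Or.inl hc.1, hc.2⟩))
        (by
          constructor
          · intro _; exact ⟨a, Or.inr rfl, hE⟩
          · intro _; rfl)
      obtain ⟨c1, c2, c3⟩ := hW
      have hconv : ∀ x, (((fun x => P x ∨ x = a) x ∨ x ∈ L)
            ∧ pvEligS rows cols grid m₀ dist x)
          ↔ ((P x ∨ x ∈ a :: L) ∧ pvEligS rows cols grid m₀ dist x) := by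
        intro x
        simp only [List.mem_cons]
        tauto
      exact ⟨fun x hx => c1 x ((hconv x).mpr hx),
             fun x hx => c2 x (fun hc => hx ((hconv x).mp hc)),
             c3.trans (by
               constructor
               · rintro ⟨x, hx⟩; exact ⟨x, (hconv x).mp hx⟩
               · rintro ⟨x, hx⟩; exact ⟨x, (hconv x).mpr hx⟩)⟩
    · have hcell : pvSweepCell rows cols grid dist (m, ch) a.1 a.2 = (m, ch) := by
        unfold pvSweepCell
        rw [if_neg]
        rintro ⟨h1, h2, h3⟩
        obtain ⟨e, he, hp⟩ := List.any_eq_true.mp h3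
        have hp' := of_decide_eq_true hp
        exact hE ⟨⟨hma.symm.trans h1, h2⟩, e, he, hp'.1, hp'.2.1, hp'.2.2.1, hp'.2.2.2.1,
          (hnb _ _).mp hp'.2.2.2.2⟩
      rw [hcell]
      have hW := ihL m ch (fun x => P x ∨ x = a)
        (List.nodup_cons.mp hnd).2
        (fun x hx => by
          rcases List.nodup_cons.mp hnd with ⟨hna, -⟩
          rintro (h | rfl)
          · exact hdisj x (List.mem_cons_of_mem _ hx) h
          · exact hna hx)
        (fun x hx => by
          rcases hx with ⟨h | rfl, hel⟩
          · exact hm1 x ⟨h, hel⟩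
          · exact absurd hel hE)
        (fun x hx => hm2 x (fun hc => hx ⟨Or.inl hc.1, hc.2⟩))
        (hch.trans (by
          constructor
          · rintro ⟨x, hx⟩; exact ⟨x, Or.inl hx.1, hx.2⟩
          · rintro ⟨x, h | rfl, hel⟩
            · exact ⟨x, h, hel⟩
            · exact absurd hel hE))
      obtain ⟨c1, c2, c3⟩ := hW
      have hconv : ∀ x, (((fun x => P x ∨ x = a) x ∨ x ∈ L)
            ∧ pvEligS rows cols grid m₀ dist x)
          ↔ ((P x ∨ x ∈ a :: L) ∧ pvEligS rows cols grid m₀ dist x) := by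
        intro x
        simp only [List.mem_cons]
        tauto
      exact ⟨fun x hx => c1 x ((hconv x).mpr hx),
             fun x hx => c2 x (fun hc => hx ((hconv x).mp hc)),
             c3.trans (by
               constructor
               · rintro ⟨x, hx⟩; exact ⟨x, (hconv x).mp hx⟩
               · rintro ⟨x, hx⟩; exact ⟨x, (hconv x).mpr hx⟩)⟩

theorem pvSweep_char (rows cols : Nat) (grid : List (List String)) (dist : Nat)
    (m₀ : List (List Int)) (hs : pvShape m₀ rows cols) :
    (∀ x, pvEligS rows cols grid m₀ dist x →
        pvGet2 (pvSweep rows cols grid dist m₀).1 x.1 x.2 = some ((dist : Int) + 1)) ∧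
    (∀ x, ¬ pvEligS rows cols grid m₀ dist x →
        pvGet2 (pvSweep rows cols grid dist m₀).1 x.1 x.2 = pvGet2 m₀ x.1 x.2) ∧
    ((pvSweep rows cols grid dist m₀).2 = true ↔ ∃ x, pvEligS rows cols grid m₀ dist x) := by
  rw [pvSweep_eq_lex]
  have h := pvSweepFold_char rows cols grid dist m₀ (pvLex rows cols) m₀ false (fun _ => False)
    (pvLex_nodup rows cols) (fun x _ => id) (fun x hx => absurd hx.1 id)
    (fun x _ => rfl) (by simp)
  obtain ⟨c1, c2, c3⟩ := h
  have hmem : ∀ x, pvEligS rows cols grid m₀ dist x → x ∈ pvLex rows cols := by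
    intro x hx
    rw [pvLex_mem]
    exact pvGet2_bounds hs hx.1.1
  refine ⟨fun x hx => c1 x ⟨Or.inr (hmem x hx), hx⟩, fun x hx => c2 x ?_, c3.trans ?_⟩
  · rintro ⟨-, hel⟩
    exact hx hel
  · constructor
    · rintro ⟨x, -, hel⟩; exact ⟨x, hel⟩
    · rintro ⟨x, hel⟩; exact ⟨x, Or.inr (hmem x hel), hel⟩

theorem pvFoldPres {α β : Type} (P : β → Prop) (f : β → α → β)
    (h : ∀ st a, P st → P (f st a)) : ∀ (l : List α) (st : β), P st → P (l.foldl f st) := by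
  intro l
  induction l with
  | nil => intro st hst; exact hst
  | cons a l ih => intro st hst; exact ih _ (h st a hst)

theorem pvSweep_shape {rows cols : Nat} {grid : List (List String)} {dist : Nat}
    {m : List (List Int)} (hs : pvShape m rows cols) :
    pvShape (pvSweep rows cols grid dist m).1 rows cols := by
  unfold pvSweep
  refine pvFoldPres (fun (st : List (List Int) × _) => pvShape st.1 rows cols) _ ?_ _ _ hs
  intro st r hst
  refine pvFoldPres (fun (st : List (List Int) × _) => pvShape st.1 rows cols) _ ?_ _ _ hst
  intro st c hst
  unfold pvSweepCell
  split_ifs with h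
  · exact pvShape_set2 _ _ _ hst
  · exact hst

theorem pvLvl_shape {rows cols : Nat} {grid : List (List String)} {dist : Nat}
    {f : List (Nat × Nat)} {m : List (List Int)} {nxt : List (Nat × Nat)}
    (hs : pvShape m rows cols) :
    pvShape (pvLvl rows cols grid dist f (m, nxt)).1 rows cols := by
  unfold pvLvl
  refine pvFoldPres (fun (st : List (List Int) × _) => pvShape st.1 rows cols) _ ?_ _ _ hs
  intro st cell hst
  unfold pvLvlCell
  refine pvFoldPres (fun (st : List (List Int) × _) => pvShape st.1 rows cols) _ ?_ _ _ hst
  intro st d hst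
  simp only [pvLvlDir]
  split_ifs with h
  · exact pvShape_set2 _ _ _ hst
  · exact hst

-- ---- characterisation of the initial scans ----
theorem pvSetMapRange {α : Type} (f : Nat → α) (k n : Nat) (v : α) (hk : k < n) :
    ((List.range n).map f).set k v = (List.range n).map fun i => if i = k then v else f i := by
  apply List.ext_getElem (by simp)
  intro i hi hi'
  simp only [List.length_set, List.length_map, List.length_range] at hi hi'
  rw [List.getElem_set]
  simp only [List.getElem_map, List.getElem_range]
  rcases eq_or_ne i k with rfl | h
  · simp
  · simp [h, Ne.symm h]

theorem pvInitRow_char (grid : List (List String)) (cols : Nat) (r : Nat) :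
    ∀ (n : Nat), n ≤ cols → ∀ (m : List (List Int)) (f : List (Nat × Nat)),
      r < m.length → m.getD r [] = List.replicate cols (-1) →
      (List.range n).foldl (pvLvlInitCell grid r) (m, f)
        = (m.set r ((List.range cols).map fun c =>
              if c < n ∧ (grid.getD r []).getD c "" = "G" then (0 : Int) else -1),
           f ++ (((List.range n).filter fun c =>
              decide ((grid.getD r []).getD c "" = "G")).map fun c => (r, c))) := by
  intro n
  induction n with
  | zero =>
    intro _ m f hr hrow
    have h1 : ((List.range cols).map fun c =>
        if c < 0 ∧ (grid.getD r []).getD c "" = "G" then (0 : Int) else -1)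
        = List.replicate cols (-1) := by
      rw [List.map_congr_left (g := fun _ => (-1 : Int)) (fun c _ => by simp),
        List.map_const']
      simp
    rw [h1, ← hrow]
    have : m.getD r [] = m[r] := by
      simp [List.getD_eq_getElem?_getD, List.getElem?_eq_getElem hr]
    rw [this, List.set_getElem_self]
    simp
  | succ n ih =>
    intro hn m f hr hrow
    rw [List.range_succ, List.foldl_append, ih (by omega) m f hr hrow]
    simp only [List.foldl_cons, List.foldl_nil]
    have hgetD : (m.set r ((List.range cols).map fun c =>
        if c < n ∧ (grid.getD r []).getD c "" = "G" then (0 : Int) else -1)).getD r []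
        = (List.range cols).map fun c =>
            if c < n ∧ (grid.getD r []).getD c "" = "G" then (0 : Int) else -1 := by
      simp [List.getD_eq_getElem?_getD, List.getElem?_set_eq_of_lt _ (by simpa using hr)]
    by_cases hG : (grid.getD r []).getD n "" = "G"
    · rw [pvLvlInitCell, if_pos hG]
      simp only [pvSet2, hgetD, List.set_set]
      simp only [Prod.mk.injEq]
      refine ⟨?_, ?_⟩
      · rw [pvSetMapRange _ n cols _ (by omega)]
        apply congrArg (m.set r ·)
        apply List.map_congr_left
        intro c _
        by_cases hc : c = n
        · subst hc
          simp only [List.getD_eq_getElem?_getD] at hG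
          simp [hG]
        · have h : (c < n) ↔ (c < n + 1) := by omega
          simp [hc, h]
      · rw [List.filter_append]
        simp only [List.getD_eq_getElem?_getD] at hG
        simp [hG]
    · rw [pvLvlInitCell, if_neg hG]
      simp only [Prod.mk.injEq]
      refine ⟨?_, ?_⟩
      · apply congrArg (m.set r ·)
        apply List.map_congr_left
        intro c _
        by_cases hc : c = n
        · subst hc
          simp only [List.getD_eq_getElem?_getD] at hG
          simp [hG]
        · have h : (c < n) ↔ (c < n + 1) := by omega
          simp [h]
      · rw [List.filter_append]
        simp only [List.getD_eq_getElem?_getD] at hG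
        simp [hG]

theorem pvInit_fold_char (rows cols : Nat) (grid : List (List String)) :
    ∀ (k : Nat), k ≤ rows →
      (List.range k).foldl (fun st r => (List.range cols).foldl (pvLvlInitCell grid r) st)
          (List.replicate rows (List.replicate cols (-1)), [])
        = ((List.range rows).map fun r =>
              if r < k
              then (List.range cols).map fun c =>
                  if (grid.getD r []).getD c "" = "G" then (0 : Int) else -1
              else List.replicate cols (-1),
           (List.range k).flatMap fun r =>
              (((List.range cols).filter fun c =>
                  decide ((grid.getD r []).getD c "" = "G")).map fun c => (r, c))) := by
  intro k
  induction k with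
  | zero =>
    intro _
    have h1 : ((List.range rows).map fun r =>
        if r < 0
        then (List.range cols).map fun c =>
            if (grid.getD r []).getD c "" = "G" then (0 : Int) else -1
        else List.replicate cols (-1)) = List.replicate rows (List.replicate cols (-1)) := by
      rw [List.map_congr_left (g := fun _ => List.replicate cols (-1 : Int)) (fun r _ => by simp),
        List.map_const']
      simp
    rw [h1]
    simp
  | succ k ih =>
    intro hk
    rw [List.range_succ, List.foldl_append, ih (by omega)]
    simp only [List.foldl_cons, List.foldl_nil]
    have hlen : k < (((List.range rows).map fun r =>
        if r < k
        then (List.range cols).map fun c =>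
            if (grid.getD r []).getD c "" = "G" then (0 : Int) else -1
        else List.replicate cols (-1))).length := by simpa using hk
    have hgetD : (((List.range rows).map fun r =>
        if r < k
        then (List.range cols).map fun c =>
            if (grid.getD r []).getD c "" = "G" then (0 : Int) else -1
        else List.replicate cols (-1))).getD k [] = List.replicate cols (-1) := by
      simp [List.getD_eq_getElem?_getD, List.getElem?_range (show k < rows by omega)]
    rw [pvInitRow_char grid cols k cols (le_refl _) _ _ hlen hgetD]
    simp only [Prod.mk.injEq]
    refine ⟨?_, ?_⟩
    · rw [pvSetMapRange _ k rows _ (by omega)]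
      apply List.map_congr_left
      intro r hr
      by_cases h1 : r = k
      · subst h1
        simp only [if_pos (by omega : r < r + 1)]
        apply List.map_congr_left
        intro c hc
        simp only [List.mem_range] at hc
        simp [hc]
      · simp only [if_neg h1]
        have h : (r < k) ↔ (r < k + 1) := by omega
        simp [h]
    · rw [List.flatMap_append]
      simp

theorem pvLvlInit_char (rows cols : Nat) (grid : List (List String)) :
    (pvLvlInit rows cols grid).1 = pvInitAlt rows cols grid ∧
    (∀ p : Nat × Nat, p ∈ (pvLvlInit rows cols grid).2 ↔
        p.1 < rows ∧ p.2 < cols ∧ (grid.getD p.1 []).getD p.2 "" = "G") := by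
  have h := pvInit_fold_char rows cols grid rows (le_refl _)
  unfold pvLvlInit
  rw [h]
  constructor
  · unfold pvInitAlt
    apply List.map_congr_left
    intro r hr
    simp only [List.mem_range] at hr
    simp [hr]
  · intro p
    simp only [List.mem_flatMap, List.mem_map, List.mem_filter, List.mem_range]
    constructor
    · rintro ⟨r, hr, c, ⟨hc, hG⟩, rfl⟩
      exact ⟨hr, hc, by simpa using hG⟩
    · rintro ⟨h1, h2, h3⟩
      exact ⟨p.1, h1, p.2, ⟨h2, by simpa using h3⟩, rfl⟩

theorem pvInitAlt_shape (rows cols : Nat) (grid : List (List String)) :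
    pvShape (pvInitAlt rows cols grid) rows cols := by
  constructor
  · simp [pvInitAlt]
  · intro row h
    simp only [pvInitAlt, List.mem_map] at h
    obtain ⟨r, -, rfl⟩ := h
    simp

theorem pvInitAlt_get2 (rows cols : Nat) (grid : List (List String)) (i j : Nat) :
    pvGet2 (pvInitAlt rows cols grid) i j
      = if i < rows ∧ j < cols
        then some (if (grid.getD i []).getD j "" = "G" then (0 : Int) else -1)
        else none := by
  unfold pvGet2 pvInitAlt
  by_cases hi : i < rows
  · rw [List.getElem?_map]
    simp only [List.getElem?_range hi, Option.map_some, Option.bind_some]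
    by_cases hj : j < cols
    · rw [List.getElem?_map]
      simp [hi, hj]
    · rw [List.getElem?_map]
      simp [hj]
  · rw [List.getElem?_map]
    simp [hi]

-- ---- the two loops compute the same matrix ----
theorem pvLoops_eq (rows cols : Nat) (grid : List (List String)) :
    ∀ (n : Nat) (m : List (List Int)) (f : List (Nat × Nat)) (d : Nat),
      pvCountNeg m ≤ n → pvShape m rows cols →
      (∀ p : Nat × Nat, p ∈ f ↔ pvGet2 m p.1 p.2 = some (d : Int)) →
      (∀ i j v, pvGet2 m i j = some v → v = -1 ∨ ((0 : Int) ≤ v ∧ v ≤ (d : Int))) →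
      pvLvlLoop rows cols grid f m d = pvSweepLoop rows cols grid m d := by
  intro n
  induction n using Nat.strong_induction_on with
  | _ n ih =>
    intro m f d hcount hs hf hv
    obtain ⟨s1, s2, s3⟩ := pvSweep_char rows cols grid d m hs
    -- the level's fill-in set, described on the sweep side
    by_cases hne : ∃ x, pvEligS rows cols grid m d x
    · -- something changes: both loops advance to level d+1 on the same matrix
      obtain ⟨l1, l2, l3⟩ := pvLvl_char rows cols grid d m f m [] (fun _ => False)
        (fun x hx => absurd hx id) (fun x _ => rfl) (by simp)
      have hiff : ∀ x, pvEligL rows cols grid m f x ↔ pvEligS rows cols grid m d x :=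
        fun x => pvElig_iff hs hf x
      have l1' : ∀ x, pvEligS rows cols grid m d x →
          pvGet2 (pvLvl rows cols grid d f (m, [])).1 x.1 x.2 = some ((d : Int) + 1) :=
        fun x hx => l1 x (Or.inr ((hiff x).mpr hx))
      have l2' : ∀ x, ¬ pvEligS rows cols grid m d x →
          pvGet2 (pvLvl rows cols grid d f (m, [])).1 x.1 x.2 = pvGet2 m x.1 x.2 := by
        intro x hx
        refine l2 x ?_
        rintro (h | h)
        · exact h
        · exact hx ((hiff x).mp h)
      have l3' : ∀ x, x ∈ (pvLvl rows cols grid d f (m, [])).2 ↔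
          pvEligS rows cols grid m d x := by
        intro x
        rw [l3 x]
        constructor
        · rintro (h | h)
          · exact absurd h id
          · exact (hiff x).mp h
        · intro h
          exact Or.inr ((hiff x).mpr h)
      have hch : (pvSweep rows cols grid d m).2 = true := s3.mpr hne
      have hshL : pvShape (pvLvl rows cols grid d f (m, [])).1 rows cols := pvLvl_shape hs
      have hshS : pvShape (pvSweep rows cols grid d m).1 rows cols := pvSweep_shape hs
      have hmm : (pvLvl rows cols grid d f (m, [])).1 = (pvSweep rows cols grid d m).1 := by
        refine pvExt2 hshL hshS ?_
        intro i j
        by_cases hE : pvEligS rows cols grid m d (i, j)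
        · rw [l1' (i, j) hE, s1 (i, j) hE]
        · rw [l2' (i, j) hE, s2 (i, j) hE]
      -- the frontier is nonempty: obtain a head to unfold pvLvlLoop
      obtain ⟨x₀, hx₀⟩ := hne
      have hf0 : f ≠ [] := by
        rintro rfl
        obtain ⟨-, e, -, h1, h2, h3, h4, hg⟩ := hx₀
        have := (hf (((x₀.1 : Int) + e.1).toNat, ((x₀.2 : Int) + e.2).toNat)).mpr hg
        simp at this
      have hdec : pvCountNeg (pvSweep rows cols grid d m).1 < pvCountNeg m :=
        pvSweep_decr rows cols grid d m hch
      have hstep := ih (pvCountNeg (pvLvl rows cols grid d f (m, [])).1)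
        (by rw [hmm]; omega)
        (pvLvl rows cols grid d f (m, [])).1 (pvLvl rows cols grid d f (m, [])).2 (d + 1)
        (le_refl _) hshL
        (by
          intro p
          rw [l3' p]
          constructor
          · intro h
            rw [l1' p h]
            norm_cast
          · intro h
            by_cases hE : pvEligS rows cols grid m d p
            · exact hE
            · exfalso
              rw [l2' p hE] at h
              rcases hv p.1 p.2 _ h with h' | h'
              · omega
              · have : ((d : Int) + 1) ≤ (d : Int) := by
                  have := h'.2
                  push_cast at this
                  omega
                omega)
        (by
          intro i j v h
          by_cases hE : pvEligS rows cols grid m d (i, j)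
          · rw [l1' (i, j) hE] at h
            have := Option.some.inj h
            right
            constructor <;> push_cast <;> omega
          · rw [l2' (i, j) hE] at h
            rcases hv i j v h with h' | h'
            · exact Or.inl h'
            · right
              constructor
              · exact h'.1
              · have := h'.2
                push_cast
                omega)
      match f, hf0 with
      | p :: f', _ =>
        rw [pvLvlLoop]
        rw [pvSweepLoop]
        rw [dif_pos hch]
        rw [hstep, hmm]
    · -- nothing changes: the sweep stops; the frontier expands nothing and the level loop stops too
      obtain ⟨l1, l2, l3⟩ := pvLvl_char rows cols grid d m f m [] (fun _ => False)
        (fun x hx => absurd hx id) (fun x _ => rfl) (by simp)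
      have hiff : ∀ x, pvEligL rows cols grid m f x ↔ pvEligS rows cols grid m d x :=
        fun x => pvElig_iff hs hf x
      have hch : (pvSweep rows cols grid d m).2 = false := by
        rcases h : (pvSweep rows cols grid d m).2 with - | -
        · rfl
        · exact absurd (s3.mp h) hne
      have hmsw : (pvSweep rows cols grid d m).1 = m := by
        refine pvExt2 (pvSweep_shape hs) hs ?_
        intro i j
        exact s2 (i, j) (fun hE => hne ⟨(i, j), hE⟩)
      rw [pvSweepLoop, dif_neg (by rw [hch]; simp), hmsw]
      match f with
      | [] => rw [pvLvlLoop]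
      | p :: f' =>
        rw [pvLvlLoop]
        have hnil : (pvLvl rows cols grid d (p :: f') (m, [])).2 = [] := by
          rw [List.eq_nil_iff_forall_not_mem]
          intro x hx
          rcases (l3 x).mp hx with h | h
          · exact h
          · exact hne ⟨x, (hiff x).mp h⟩
        have hmat : (pvLvl rows cols grid d (p :: f') (m, [])).1 = m := by
          refine pvExt2 (pvLvl_shape hs) hs ?_
          intro i j
          refine l2 (i, j) ?_
          rintro (h | h)
          · exact h
          · exact hne ⟨(i, j), (hiff (i, j)).mp h⟩
        simp only [hnil, hmat]
        rw [pvLvlLoop]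

-- ===== VERDICT (by name: the statement is the Claim_ definition above) =====
theorem bfs_closing_windows_spec : Claim_equal_bfs_closing_windows := by
  intro grid _ _
  unfold Spec_bfs_closing_windows bfs_closing_windows_alt
  rw [pvA_eq_lvl]
  set rows := grid.length
  set cols := (grid.getD 0 []).length
  obtain ⟨hminit, hfinit⟩ := pvLvlInit_char rows cols grid
  rw [hminit]
  refine pvLoops_eq rows cols grid (pvCountNeg (pvInitAlt rows cols grid)) _ _ 0
    (le_refl _) (pvInitAlt_shape rows cols grid) ?_ ?_
  · intro p
    rw [hfinit p]
    rw [pvInitAlt_get2]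
    constructor
    · rintro ⟨h1, h2, h3⟩
      simp only [List.getD_eq_getElem?_getD] at h3
      simp [h1, h2, h3]
    · intro h
      split_ifs at h with h1 h2
      · exact ⟨h1.1, h1.2, h2⟩
      · simp at h
  · intro i j v h
    rw [pvInitAlt_get2] at h
    split_ifs at h with h1 h2 <;> simp_all
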